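-- pv_equiv track=rewrite | github.com/RuslanPerm/your_wallet_assistant | ywa_bot.py | replace_comma_to_point
-- ===== SOURCE A (Python) =====
-- def replace_comma_to_point(message):
--     count_commas = 0
--     lst_mes = [elem for elem in message]  # преобразуем в список, чтобы можно было поменять элементы
--
--     for i in range(len(lst_mes)):
--         if lst_mes[i] == ',':  # если находим запятую в сообщении, то заменяем её на точку
--             if count_commas == 0:  # если ещё не было запятых, то меняем её на точку
--                 count_commas += 1
--                 lst_mes[i] = '.'
--             else:  # если запятые уже были, значит пользователь ошибся, возвращаем его сообщение,
--                 # дальше обработчик сам определит, что там ошибка и попросит ввести снова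
--                 return message
--     message = ''.join(lst_mes)
--     return message
-- ===== SOURCE B (Python) =====
-- def replace_comma_to_point(message):
--     parts = message.split(',')
--     if len(parts) > 2:
--         return message
--     return '.'.join(parts)
-- ===== Notes on version B (the rewrite author's own statement) =====
-- stated objective: simpler
-- what changed: Replaces A's index loop over a mutable char list (with an early return interleaved into the counting) by a single split on the comma, a guard on the piece count, and a period-join reconstruction.
import Mathlib
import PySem

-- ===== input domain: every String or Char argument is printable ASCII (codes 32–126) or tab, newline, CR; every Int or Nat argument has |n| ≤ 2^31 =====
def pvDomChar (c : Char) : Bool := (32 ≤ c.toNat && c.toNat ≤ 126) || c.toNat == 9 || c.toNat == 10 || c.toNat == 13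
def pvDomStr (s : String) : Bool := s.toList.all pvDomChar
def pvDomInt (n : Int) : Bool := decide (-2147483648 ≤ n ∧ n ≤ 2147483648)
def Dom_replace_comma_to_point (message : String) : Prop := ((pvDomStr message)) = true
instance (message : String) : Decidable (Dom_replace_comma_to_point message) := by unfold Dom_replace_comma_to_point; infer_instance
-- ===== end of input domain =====

-- B replaces A's index loop over a mutable char list (early return interleaved with counting)
-- by split-on-comma, a guard on the piece count, and a '.'-join; objective: simpler.

-- ===== PORT A =====
-- the for-loop over the char list: `none` = the early `return message`,
-- the Bool tracks `count_commas == 0` (the counter is only ever tested against 0)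
def pvReplaceGo : List Char → Bool → Option (List Char)
  | [], _ => some []
  | c :: rest, seen =>
    if c = ',' then
      if seen then none
      else (pvReplaceGo rest true).map (fun t => '.' :: t)
    else (pvReplaceGo rest seen).map (fun t => c :: t)

def replace_comma_to_point (message : String) : String :=
  match pvReplaceGo message.toList false with
  | some l => String.ofList l          -- ''.join(lst_mes)
  | none => message                    -- the early `return message`

-- ===== PORT B =====
def replace_comma_to_point_alt (message : String) : String :=
  let parts := PySem.Chars.splitOn message.toList [',']   -- message.split(',')
  if parts.length > 2 then message
  else String.ofList (PySem.Chars.join ['.'] parts)       -- '.'.join(parts)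

-- ===== PRECONDITION & SPEC =====
def Spec_replace_comma_to_point (message : String) (out : String) : Prop := out = replace_comma_to_point_alt message
instance (message : String) (out : String) : Decidable (Spec_replace_comma_to_point message out) := by unfold Spec_replace_comma_to_point; infer_instance

-- ===== CLAIM (what is proved, stated in full; the proofs are below) =====
def Claim_equal_replace_comma_to_point : Prop := ∀ (message : String), Dom_replace_comma_to_point message → Spec_replace_comma_to_point message (replace_comma_to_point message)

-- ===== LEMMAS AND PROOFS =====

-- PySem's fuelled splitOn on the one-char separator [','] is List.splitOnP (· == ',')
theorem pv_go_spec (fuel : Nat) (l cur : List Char) (acc : List (List Char))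
    (h : l.length ≤ fuel) :
    PySem.Chars.splitOn.go [','] fuel l cur acc
      = acc.reverse ++ (List.splitOnP (fun x => x == ',') l).modifyHead (cur.reverse ++ ·) := by
  induction fuel generalizing l cur acc with
  | zero =>
    have hl : l = [] := List.length_eq_zero_iff.mp (Nat.le_zero.mp h)
    subst hl
    simp [PySem.Chars.splitOn.go, List.splitOnP_nil]
  | succ f ih =>
    cases l with
    | nil => simp [PySem.Chars.splitOn.go, List.splitOnP_nil]
    | cons c rest =>
      have hne : List.splitOnP (fun x => x == ',') rest ≠ [] := List.splitOnP_ne_nil _ rest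
      obtain ⟨h0, t0, hsp⟩ := List.exists_cons_of_ne_nil hne
      by_cases hc : c = ','
      · subst hc
        have hp : [','].isPrefixOf (',' :: rest) = true := by simp [List.isPrefixOf]
        rw [PySem.Chars.splitOn.go]
        simp only [hp, if_pos, List.length_cons, List.length_nil, List.drop_succ_cons,
          List.drop_zero]
        rw [ih rest [] (cur.reverse :: acc) (Nat.le_of_succ_le_succ h)]
        simp [List.splitOnP_cons, hsp]
      · have hp : [','].isPrefixOf (c :: rest) = false := by
          simp [List.isPrefixOf]; exact fun hcc => absurd hcc.symm hc
        rw [PySem.Chars.splitOn.go]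
        simp only [hp, Bool.false_eq_true, if_neg, not_false_iff]
        rw [ih rest (c :: cur) acc (Nat.le_of_succ_le_succ h)]
        simp [List.splitOnP_cons, hsp, hc]

theorem pv_splitOn_eq (cs : List Char) :
    PySem.Chars.splitOn cs [','] = List.splitOnP (fun x => x == ',') cs := by
  rw [PySem.Chars.splitOn, pv_go_spec _ _ _ _ (Nat.le_succ _)]
  have hne : List.splitOnP (fun x => x == ',') cs ≠ [] := List.splitOnP_ne_nil _ cs
  obtain ⟨h0, t0, hsp⟩ := List.exists_cons_of_ne_nil hne
  simp [hsp]

theorem pv_length_splitOn (cs : List Char) :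
    (List.splitOnP (fun x => x == ',') cs).length = cs.count ',' + 1 := by
  induction cs with
  | nil => simp [List.splitOnP_nil]
  | cons c rest ih =>
    by_cases hc : c = ','
    · subst hc; simp [List.splitOnP_cons, ih]
    · simp [List.splitOnP_cons, hc, ih]

-- '.'-joining the pieces of any (a ++ h) :: t equals a ++ the join of h :: t
theorem pv_join_modifyHead (a h : List Char) (t : List (List Char)) :
    PySem.Chars.join ['.'] ((a ++ h) :: t) = a ++ PySem.Chars.join ['.'] (h :: t) := by
  cases t with
  | nil => simp [PySem.Chars.join_singleton]
  | cons q t' => simp [PySem.Chars.join_cons_cons]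

-- joining the comma-split with '.' substitutes every comma
theorem pv_join_splitOn (cs : List Char) :
    PySem.Chars.join ['.'] (List.splitOnP (fun x => x == ',') cs)
      = cs.map (fun c => if c = ',' then '.' else c) := by
  induction cs with
  | nil => simp [List.splitOnP_nil, PySem.Chars.join_singleton]
  | cons c rest ih =>
    have hne : List.splitOnP (fun x => x == ',') rest ≠ [] := List.splitOnP_ne_nil _ rest
    obtain ⟨h0, t0, hsp⟩ := List.exists_cons_of_ne_nil hne
    by_cases hc : c = ','
    · subst hc
      rw [List.splitOnP_cons]
      simp only [beq_self_eq_true, if_pos]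
      rw [hsp, PySem.Chars.join_cons_cons, ← hsp, ih]
      simp
    · rw [List.splitOnP_cons]
      have hcb : ((fun x => x == ',') c) = false := by simp [hc]
      simp only [hcb, Bool.false_eq_true, if_neg, not_false_iff]
      rw [hsp, List.modifyHead_cons]
      have : (c :: h0) = [c] ++ h0 := rfl
      rw [this, pv_join_modifyHead, ← hsp, ih]
      simp [hc]

theorem pv_go_no_comma (cs : List Char) (b : Bool) (h : cs.count ',' = 0) :
    pvReplaceGo cs b = some cs := by
  induction cs generalizing b with
  | nil => rfl
  | cons c rest ih =>
    rw [List.count_cons] at h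
    have hc : c ≠ ',' := by
      intro hcc; subst hcc; simp at h
    have h0 : rest.count ',' = 0 := by omega
    simp [pvReplaceGo, hc, ih b h0]

theorem pv_go_seen (cs : List Char) (h : 1 ≤ cs.count ',') :
    pvReplaceGo cs true = none := by
  induction cs with
  | nil => simp at h
  | cons c rest ih =>
    by_cases hc : c = ','
    · subst hc; simp [pvReplaceGo]
    · rw [List.count_cons] at h
      have h1 : 1 ≤ rest.count ',' := by simpa [hc] using h
      simp [pvReplaceGo, hc, ih h1]

theorem pv_go_le_one (cs : List Char) (h : cs.count ',' ≤ 1) :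
    pvReplaceGo cs false = some (cs.map (fun c => if c = ',' then '.' else c)) := by
  induction cs with
  | nil => rfl
  | cons c rest ih =>
    by_cases hc : c = ','
    · subst hc
      rw [List.count_cons] at h
      have h0 : rest.count ',' = 0 := by simp only [beq_self_eq_true, if_true] at h; omega
      have hnotin : ',' ∉ rest := List.count_eq_zero.mp h0
      have hmap : rest.map (fun c => if c = ',' then '.' else c) = rest.map id :=
        List.map_congr_left (by
          intro x hx
          have hx' : x ≠ ',' := fun hxc => hnotin (hxc ▸ hx)
          simp [hx'])
      simp [pvReplaceGo, pv_go_no_comma rest true h0, hmap]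
    · rw [List.count_cons] at h
      have h1 : rest.count ',' ≤ 1 := by simpa [hc] using h
      simp [pvReplaceGo, hc, ih h1]

theorem pv_go_ge_two (cs : List Char) (h : 2 ≤ cs.count ',') :
    pvReplaceGo cs false = none := by
  induction cs with
  | nil => simp at h
  | cons c rest ih =>
    rw [List.count_cons] at h
    by_cases hc : c = ','
    · subst hc
      have h1 : 1 ≤ rest.count ',' := by simp only [beq_self_eq_true, if_true] at h; omega
      simp [pvReplaceGo, pv_go_seen rest h1]
    · have h2 : 2 ≤ rest.count ',' := by simpa [hc] using h
      simp [pvReplaceGo, hc, ih h2]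

-- ===== VERDICT (by name: the statement is the Claim_ definition above) =====
theorem replace_comma_to_point_spec : Claim_equal_replace_comma_to_point := by
  intro message _
  unfold Spec_replace_comma_to_point
  simp only [replace_comma_to_point, replace_comma_to_point_alt, pv_splitOn_eq]
  by_cases h : 2 ≤ message.toList.count ','
  · rw [pv_go_ge_two _ h]
    have hlen : (List.splitOnP (fun x => x == ',') message.toList).length > 2 := by
      rw [pv_length_splitOn]; omega
    simp [hlen]
  · have h1 : message.toList.count ',' ≤ 1 := by omega
    rw [pv_go_le_one _ h1]
    have hlen : ¬ (List.splitOnP (fun x => x == ',') message.toList).length > 2 := by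
      rw [pv_length_splitOn]; omega
    simp [hlen, pv_join_splitOn]
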